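-- pv_equiv track=rewrite | github.com/miramastoras/centrolign_analysis | analysis_notes/release2_QC_v2/permutation_test_scripts/localID_minus_CDR_permutation_per_chrom_short_indels.py | interval_union
-- ===== SOURCE A (Python) =====
-- def interval_union(intervals_a, intervals_b):
--     """Return the merged union of two sets of intervals."""
--     all_intervals = sorted(intervals_a + intervals_b)
--     if not all_intervals:
--         return []
--     merged = [all_intervals[0]]
--     for start, end in all_intervals[1:]:
--         if start <= merged[-1][1]:
--             merged[-1] = (merged[-1][0], max(merged[-1][1], end))
--         else:
--             merged.append((start, end))
--     return merged
-- ===== SOURCE B (Python) =====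
-- def interval_union(intervals_a, intervals_b):
--     """Merged union of two interval sets, built back-to-front: walk the sorted
--     intervals from largest to smallest and absorb the front of the result."""
--     def absorb(s, e, merged):
--         while merged and merged[0][0] <= e:
--             e = max(e, merged[0][1])
--             merged = merged[1:]
--         return [(s, e)] + merged
--
--     out = []
--     for s, e in reversed(sorted(intervals_a + intervals_b)):
--         out = absorb(s, e, out)
--     return out
-- ===== Notes on version B (the rewrite author's own statement) =====
-- stated objective: alternative
-- what changed: Replaces A's forward foldl that mutates the last element of the accumulated merged list with a back-to-front pass: intervals are taken from largest to smallest and each one recursively absorbs the overlapping/touching prefix of the already-built result.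
import Mathlib
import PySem

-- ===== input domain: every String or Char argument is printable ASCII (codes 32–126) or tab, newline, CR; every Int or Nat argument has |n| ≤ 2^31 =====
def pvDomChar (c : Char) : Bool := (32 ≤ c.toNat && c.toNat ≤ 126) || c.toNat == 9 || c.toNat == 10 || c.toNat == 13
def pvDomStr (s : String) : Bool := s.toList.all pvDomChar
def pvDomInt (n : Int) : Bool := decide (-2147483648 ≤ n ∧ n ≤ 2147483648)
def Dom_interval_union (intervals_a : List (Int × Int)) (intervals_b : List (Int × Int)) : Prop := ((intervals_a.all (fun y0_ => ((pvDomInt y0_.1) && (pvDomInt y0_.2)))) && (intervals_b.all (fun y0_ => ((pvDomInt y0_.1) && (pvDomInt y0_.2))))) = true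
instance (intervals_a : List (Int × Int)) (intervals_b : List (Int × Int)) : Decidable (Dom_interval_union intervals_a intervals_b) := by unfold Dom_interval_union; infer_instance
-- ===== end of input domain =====

-- B builds the merged union back-to-front (largest interval first, recursively absorbing the
-- result's front) instead of A's forward scan updating the last merged interval; same cost.

-- ===== PORT A =====
-- literal port of A: sort all intervals, seed merged with the first, then for each remaining
-- interval either extend merged[-1] or append.
def interval_union (intervals_a : List (Int × Int)) (intervals_b : List (Int × Int)) : List (Int × Int) :=
  let all_intervals := PySem.List.sorted2 (intervals_a ++ intervals_b) (fun p => p.1) (fun p => p.2)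
  match all_intervals with
  | [] => []
  | x0 :: rest =>
    rest.foldl (fun merged p =>
      let last := (merged.getLast?).getD (0, 0)   -- merged is never empty; default unreachable
      if p.1 ≤ last.2 then merged.dropLast ++ [(last.1, max last.2 p.2)]
      else merged ++ [p]) [x0]

-- ===== PORT B =====
-- B's absorb: while the result's first interval starts no later than e, swallow it.
def ivAbsorb (s e : Int) : List (Int × Int) → List (Int × Int)
  | [] => [(s, e)]
  | (s2, e2) :: rest => if s2 ≤ e then ivAbsorb s (max e e2) rest else (s, e) :: (s2, e2) :: rest

def interval_union_alt (intervals_a : List (Int × Int)) (intervals_b : List (Int × Int)) : List (Int × Int) :=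
  ((PySem.List.sorted2 (intervals_a ++ intervals_b) (fun p => p.1) (fun p => p.2)).reverse).foldl
    (fun out p => ivAbsorb p.1 p.2 out) []

-- ===== PRECONDITION & SPEC =====
def Spec_interval_union (intervals_a : List (Int × Int)) (intervals_b : List (Int × Int)) (out : List (Int × Int)) : Prop := out = interval_union_alt intervals_a intervals_b
instance (intervals_a : List (Int × Int)) (intervals_b : List (Int × Int)) (out : List (Int × Int)) : Decidable (Spec_interval_union intervals_a intervals_b out) := by unfold Spec_interval_union; infer_instance

-- ===== CLAIM (what is proved, stated in full; the proofs are below) =====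
def Claim_equal_interval_union : Prop := ∀ (intervals_a : List (Int × Int)) (intervals_b : List (Int × Int)), Dom_interval_union intervals_a intervals_b → Spec_interval_union intervals_a intervals_b (interval_union intervals_a intervals_b)

-- ===== LEMMAS AND PROOFS =====

-- canonical recursive merge both ports are reduced to
def ivMrg (s e : Int) : List (Int × Int) → List (Int × Int)
  | [] => [(s, e)]
  | (s2, e2) :: t => if s2 ≤ e then ivMrg s (max e e2) t else (s, e) :: ivMrg s2 e2 t

-- A's foldl with a frozen prefix equals the canonical merge
theorem ivA_fold (t : List (Int × Int)) :
    ∀ (pre : List (Int × Int)) (s e : Int),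
    t.foldl (fun merged p =>
      let last := (merged.getLast?).getD (0, 0)
      if p.1 ≤ last.2 then merged.dropLast ++ [(last.1, max last.2 p.2)]
      else merged ++ [p]) (pre ++ [(s, e)]) = pre ++ ivMrg s e t := by
  induction t with
  | nil => intro pre s e; simp [ivMrg]
  | cons p t ih =>
    intro pre s e
    obtain ⟨ps, pe⟩ := p
    simp only [List.foldl_cons, ivMrg]
    by_cases h : ps ≤ e
    · simp only [List.getLast?_concat, Option.getD_some, List.dropLast_concat, h, if_pos]
      exact ih pre s (max e pe)
    · simp only [List.getLast?_concat, Option.getD_some, h, if_neg, not_false_iff]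
      have h2 := ih (pre ++ [(s, e)]) ps pe
      simpa using h2

-- B's absorb applied to a canonical merge of later intervals
theorem ivAbsorb_mrg (t : List (Int × Int)) :
    ∀ (s2 e2 s e : Int), s ≤ s2 → (∀ q ∈ t, s2 ≤ q.1) →
    t.Pairwise (fun a b => a.1 ≤ b.1) →
    ivAbsorb s e (ivMrg s2 e2 t) = ivMrg s e ((s2, e2) :: t) := by
  induction t with
  | nil =>
    intro s2 e2 s e _ _ _
    by_cases h : s2 ≤ e <;> simp [ivMrg, ivAbsorb, h]
  | cons q r ih =>
    intro s2 e2 s e hss2 hall hpw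
    obtain ⟨s3, e3⟩ := q
    have hs23 : s2 ≤ s3 := hall (s3, e3) (by simp)
    have hallr : ∀ x ∈ r, s3 ≤ x.1 := by
      intro x hx; exact (List.pairwise_cons.mp hpw).1 x hx
    have hpwr := (List.pairwise_cons.mp hpw).2
    by_cases h32 : s3 ≤ e2
    · -- (s2,e2) swallows (s3,e3)
      have step : ivMrg s2 e2 ((s3, e3) :: r) = ivMrg s2 (max e2 e3) r := by
        simp [ivMrg, h32]
      rw [step, ih s2 (max e2 e3) s e hss2 (fun x hx => le_trans hs23 (hallr x hx)) hpwr]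
      simp only [ivMrg]
      by_cases h2e : s2 ≤ e
      · simp only [h2e, if_pos]
        have h3 : s3 ≤ max e e2 := le_trans h32 (le_max_right _ _)
        simp [h3, max_assoc]
      · simp [h2e, h32]
    · -- (s2,e2) does not reach (s3,e3)
      have step : ivMrg s2 e2 ((s3, e3) :: r) = (s2, e2) :: ivMrg s3 e3 r := by
        simp [ivMrg, h32]
      rw [step]
      simp only [ivAbsorb]
      by_cases h2e : s2 ≤ e
      · simp only [h2e, if_pos]
        rw [ih s3 e3 s (max e e2) (le_trans hss2 hs23) hallr hpwr]
        simp [ivMrg, h2e, h32]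
      · simp [h2e, ivMrg, h32]

-- B's right-to-left pass equals the canonical merge on a start-sorted list
theorem ivB_fold_cons (t : List (Int × Int)) :
    ∀ (x : Int × Int), (x :: t).Pairwise (fun a b => a.1 ≤ b.1) →
    (x :: t).foldr (fun p acc => ivAbsorb p.1 p.2 acc) [] = ivMrg x.1 x.2 t := by
  induction t with
  | nil => intro x _; simp [ivAbsorb, ivMrg]
  | cons y r ih =>
    rintro x hpw
    obtain ⟨s2, e2⟩ := y
    have hpwt := (List.pairwise_cons.mp hpw).2
    have hx2 : x.1 ≤ s2 := (List.pairwise_cons.mp hpw).1 (s2, e2) (by simp)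
    have hall : ∀ q ∈ r, s2 ≤ q.1 := fun q hq => (List.pairwise_cons.mp hpwt).1 q hq
    have hpwr := (List.pairwise_cons.mp hpwt).2
    have hrec := ih (s2, e2) hpwt
    simp only [List.foldr_cons] at hrec ⊢
    rw [hrec]
    exact ivAbsorb_mrg r s2 e2 x.1 x.2 hx2 hall hpwr

-- sorted2's insertion preserves nondecreasing starts
theorem ivInsertBy_pairwise (x : Int × Int) (ys : List (Int × Int))
    (h : ys.Pairwise (fun a b => a.1 ≤ b.1)) :
    (PySem.List.insertBy
      (fun a b => decide (a.1 < b.1) || !decide (b.1 < a.1) && decide (a.2 < b.2)) x ys).Pairwise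
      (fun a b => a.1 ≤ b.1) := by
  induction ys with
  | nil => simp [PySem.List.insertBy]
  | cons y ys ih =>
    obtain ⟨hy, hys⟩ := List.pairwise_cons.mp h
    by_cases hb : (decide (x.1 < y.1) || !decide (y.1 < x.1) && decide (x.2 < y.2)) = true
    · simp only [PySem.List.insertBy, hb, if_pos]
      refine List.pairwise_cons.mpr ⟨?_, h⟩
      intro b hb'
      have hxy : x.1 ≤ y.1 := by
        simp only [Bool.or_eq_true, Bool.and_eq_true, Bool.not_eq_true', decide_eq_true_eq,
          decide_eq_false_iff_not] at hb
        omega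
      rcases List.mem_cons.mp hb' with h' | h'
      · subst h'; exact hxy
      · exact le_trans hxy (hy b h')
    · simp only [PySem.List.insertBy, hb, if_neg, Bool.not_eq_true]
      refine List.pairwise_cons.mpr ⟨?_, ih hys⟩
      intro b hb'
      have hyx : y.1 ≤ x.1 := by
        simp only [Bool.or_eq_true, Bool.and_eq_true, Bool.not_eq_true', decide_eq_true_eq,
          decide_eq_false_iff_not, not_or, not_and] at hb
        omega
      rcases (PySem.List.insertBy_mem_iff _ _ _ _).mp hb' with h' | h'
      · subst h'; exact hyx
      · exact hy b h'

theorem ivSorted2_pairwise (xs : List (Int × Int)) :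
    (PySem.List.sorted2 xs (fun p => p.1) (fun p => p.2)).Pairwise (fun a b => a.1 ≤ b.1) := by
  show (List.foldl _ [] xs).Pairwise _
  have main : ∀ (l : List (Int × Int)) (acc : List (Int × Int)),
      acc.Pairwise (fun a b => a.1 ≤ b.1) →
      (l.foldl (fun acc x => PySem.List.insertBy
        (fun a b => decide (a.1 < b.1) || !decide (b.1 < a.1) && decide (a.2 < b.2)) x acc) acc).Pairwise
        (fun a b => a.1 ≤ b.1) := by
    intro l
    induction l with
    | nil => intro acc h; simpa using h
    | cons x t ih =>
      intro acc h
      exact ih _ (ivInsertBy_pairwise x acc h)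
  exact main xs [] (by simp)

-- ===== VERDICT (by name: the statement is the Claim_ definition above) =====
theorem interval_union_spec : Claim_equal_interval_union := by
  intro ia ib _
  unfold Spec_interval_union interval_union interval_union_alt
  rw [List.foldl_reverse]
  have hpw := ivSorted2_pairwise (ia ++ ib)
  generalize hs : PySem.List.sorted2 (ia ++ ib) (fun p => p.1) (fun p => p.2) = L at hpw ⊢
  cases L with
  | nil => rfl
  | cons x0 rest =>
    rw [ivB_fold_cons rest x0 hpw]
    simpa using ivA_fold rest [] x0.1 x0.2
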